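-- pv_equiv track=rewrite | github.com/CurtisColwell/StrainViz | scripts/scripts.py | create_key
-- ===== SOURCE A (Python) =====
-- def create_key(base_atoms, dummy_atoms, bond_atoms):
-- 	key = []
-- 	extra_atoms = []
-- 	for line1 in base_atoms:
-- 		for line2 in dummy_atoms:
-- 			if line1[1:] == line2[1:]:
-- 				key.append([line2[0], line1[0]])
--
-- 	#Find atoms in dummy, but not in base geometry
-- 	extra_atoms = []
-- 	for line in dummy_atoms:
-- 		if line[0] not in [x[0] for x in key]:
-- 			extra_atoms.append(line[0])
--
-- 	#Find atoms attached to those extra atoms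
-- 	peripheral_atoms = []
-- 	for line in bond_atoms:
-- 		for atom in extra_atoms:
-- 			if str(atom) == line[0]:
-- 				peripheral_atoms.append(int(line[1]))
-- 			elif str(atom) == line[1] and int(line[0]) not in peripheral_atoms:
-- 				peripheral_atoms.append(int(line[0]))
--
-- 	#Trim off the atoms at the ends of the dummy
-- 	trimmed_key = []
-- 	for line in key:
-- 		if line[0] not in peripheral_atoms:
-- 			trimmed_key.append(line)
--
-- 	return trimmed_key
-- ===== SOURCE B (Python) =====
-- # B: index dummy atoms by their tail once (hash buckets) and use sets for the
-- # extra/peripheral membership tests; also fixes A's vacuous trim (A compares the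
-- # string atom id against a list of ints, so it never trims).
-- def create_key(base_atoms, dummy_atoms, bond_atoms):
--     buckets = {}
--     for d in dummy_atoms:
--         buckets.setdefault(tuple(d[1:]), []).append(d[0])
--     key = [[d0, b[0]] for b in base_atoms for d0 in buckets.get(tuple(b[1:]), [])]
--     base_tails = {tuple(b[1:]) for b in base_atoms}
--     matched = {d[0] for d in dummy_atoms if tuple(d[1:]) in base_tails}
--     extra = {d[0] for d in dummy_atoms} - matched
--     peripheral = set()
--     if extra:
--         for l in bond_atoms:
--             if l[0] in extra:
--                 peripheral.add(l[1])
--             if l[1] in extra and l[1] != l[0]: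
--                 peripheral.add(l[0])
--     return [pair for pair in key if pair[0] not in peripheral]
-- ===== Notes on version B (the rewrite author's own statement) =====
-- stated objective: faster
-- what changed: B replaces the nested base*dummy scan and the repeated list scans by a hash index of dummy atoms keyed on line[1:] plus set-based membership for extra/peripheral atoms, and lets the final trim actually fire (A compares the string atom id against a list of ints, so it never removes anything).
-- intended difference: On inputs where some matched dummy atom id is bonded (via bond_atoms) to an extra dummy atom, A returns the key list untrimmed because its final filter tests a string id for membership in a list of ints (never true), while B removes those peripheral pairs, which is what the 'Trim off the atoms' step evidently intends. — e.g. on create_key([["1", "a"]], [["2", "a"], ["3", "b"]], [["3", "2"]]): A returns [["2", "1"]], B returns []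
import Mathlib
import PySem

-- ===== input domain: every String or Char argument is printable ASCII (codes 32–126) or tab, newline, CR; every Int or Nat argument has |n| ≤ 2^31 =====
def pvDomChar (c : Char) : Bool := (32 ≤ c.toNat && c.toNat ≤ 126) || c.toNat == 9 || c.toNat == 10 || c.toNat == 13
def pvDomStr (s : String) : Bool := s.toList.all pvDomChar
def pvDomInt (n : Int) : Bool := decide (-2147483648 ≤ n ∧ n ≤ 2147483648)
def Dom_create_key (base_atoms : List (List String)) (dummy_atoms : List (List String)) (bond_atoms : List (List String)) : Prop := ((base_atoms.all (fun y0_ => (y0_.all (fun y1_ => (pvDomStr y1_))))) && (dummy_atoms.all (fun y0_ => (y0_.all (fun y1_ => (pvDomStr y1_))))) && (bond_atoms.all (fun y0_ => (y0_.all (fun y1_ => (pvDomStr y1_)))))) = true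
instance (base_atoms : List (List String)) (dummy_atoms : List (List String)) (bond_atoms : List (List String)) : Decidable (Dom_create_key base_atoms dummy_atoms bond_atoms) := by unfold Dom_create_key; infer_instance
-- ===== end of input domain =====

-- B indexes dummy atoms by their tail once and uses sets for the extra/peripheral
-- membership tests; B also lets the final trim fire (in A it never does, because A
-- tests a string id for membership in a list of ints) — see D_create_key below.

-- ===== PORT A =====
-- key: nested loop over base_atoms × dummy_atoms
def ckKeyA (base_atoms dummy_atoms : List (List String)) : List (List String) :=
  base_atoms.foldl (fun key line1 =>
    dummy_atoms.foldl (fun key line2 =>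
      if line1.drop 1 == line2.drop 1 then key ++ [[line2.headD "", line1.headD ""]]
      else key) key) []

-- extra_atoms: dummy ids absent from [x[0] for x in key] (recomputed per line, as in A)
def ckExtraA (base_atoms dummy_atoms : List (List String)) : List String :=
  dummy_atoms.foldl (fun ex line =>
    if ((ckKeyA base_atoms dummy_atoms).map (fun x => x.headD "")).contains (line.headD "") then ex
    else ex ++ [line.headD ""]) []

-- peripheral_atoms: ints; int(s) is PySem.Int.ofStr? (Pre_ guarantees it parses where A evaluates it)
def ckPeriphA (base_atoms dummy_atoms bond_atoms : List (List String)) : List Int :=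
  bond_atoms.foldl (fun per line =>
    (ckExtraA base_atoms dummy_atoms).foldl (fun per atom =>
      if atom == line.getD 0 "" then per ++ [(PySem.Int.ofStr? (line.getD 1 "")).getD 0]
      else if atom == line.getD 1 "" && !(per.contains ((PySem.Int.ofStr? (line.getD 0 "")).getD 0)) then
        per ++ [(PySem.Int.ofStr? (line.getD 0 "")).getD 0]
      else per) per) []

-- Python's `line[0] not in peripheral_atoms` compares a str with ints: each == is False,
-- so the membership is always False; this helper is that test, exactly.
def ckStrInIntList (_s : String) (l : List Int) : Bool := l.any (fun _ => false)

def create_key (base_atoms : List (List String)) (dummy_atoms : List (List String)) (bond_atoms : List (List String)) : List (List String) :=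
  (ckKeyA base_atoms dummy_atoms).foldl (fun trimmed line =>
    if ckStrInIntList (line.headD "") (ckPeriphA base_atoms dummy_atoms bond_atoms) then trimmed
    else trimmed ++ [line]) []

-- ===== PORT B =====
-- buckets: dict tail -> list of dummy ids (setdefault+append = modify with default [])
def ckBuckets (dummy_atoms : List (List String)) : PySem.Dict (List String) (List String) :=
  dummy_atoms.foldl (fun d ln => d.modify (ln.drop 1) [] (fun v => v ++ [ln.headD ""])) PySem.Dict.empty

def ckKeyB (base_atoms dummy_atoms : List (List String)) : List (List String) :=
  base_atoms.flatMap (fun b =>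
    ((ckBuckets dummy_atoms).getD (b.drop 1) []).map (fun d0 => [d0, b.headD ""]))

def ckBaseTails (base_atoms : List (List String)) : PySem.Set (List String) :=
  PySem.Set.ofList (base_atoms.map (fun b => b.drop 1))

def ckMatchedSet (base_atoms dummy_atoms : List (List String)) : PySem.Set String :=
  PySem.Set.ofList ((dummy_atoms.filter (fun d => (ckBaseTails base_atoms).contains (d.drop 1))).map (fun d => d.headD ""))

def ckExtraSet (base_atoms dummy_atoms : List (List String)) : PySem.Set String :=
  PySem.Set.diff (PySem.Set.ofList (dummy_atoms.map (fun d => d.headD ""))) (ckMatchedSet base_atoms dummy_atoms)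

def ckPeriphStep (X : PySem.Set String) (per : PySem.Set String) (l : List String) : PySem.Set String :=
  let per1 := if PySem.Set.contains X (l.getD 0 "") then PySem.Set.add per (l.getD 1 "") else per
  if PySem.Set.contains X (l.getD 1 "") && !(l.getD 1 "" == l.getD 0 "") then PySem.Set.add per1 (l.getD 0 "")
  else per1

def ckPeriphSet (base_atoms dummy_atoms bond_atoms : List (List String)) : PySem.Set String :=
  if (ckExtraSet base_atoms dummy_atoms).isEmpty then PySem.Set.empty
  else bond_atoms.foldl (ckPeriphStep (ckExtraSet base_atoms dummy_atoms)) PySem.Set.empty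

def create_key_alt (base_atoms : List (List String)) (dummy_atoms : List (List String)) (bond_atoms : List (List String)) : List (List String) :=
  (ckKeyB base_atoms dummy_atoms).filter
    (fun pair => !(PySem.Set.contains (ckPeriphSet base_atoms dummy_atoms bond_atoms) (pair.headD "")))

-- ===== PRECONDITION & SPEC =====
-- Input predicates used by Pre_ and D_ (pure membership/shape conditions on the input)
def ckMatchedIdP (base_atoms dummy_atoms : List (List String)) (s : String) : Prop :=
  ∃ d ∈ dummy_atoms, d.head? = some s ∧ ∃ b ∈ base_atoms, b.drop 1 = d.drop 1

def ckExtraIdP (base_atoms dummy_atoms : List (List String)) (s : String) : Prop :=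
  (∃ d ∈ dummy_atoms, d.head? = some s) ∧ ¬ ckMatchedIdP base_atoms dummy_atoms s

def ckPeriphIdP (base_atoms dummy_atoms bond_atoms : List (List String)) (s : String) : Prop :=
  ∃ l ∈ bond_atoms, ∃ a ∈ l.take 1, ∃ c ∈ (l.drop 1).take 1,
    ((ckExtraIdP base_atoms dummy_atoms a ∧ c = s) ∨
     (ckExtraIdP base_atoms dummy_atoms c ∧ c ≠ a ∧ a = s))

-- Pre_ = exactly the inputs where A raises no exception: no IndexError from line[0] on
-- empty base/dummy lines or short bond lines, no ValueError from int() on the bond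
-- entries A actually parses (those next to an extra atom).
def Pre_create_key (base_atoms : List (List String)) (dummy_atoms : List (List String)) (bond_atoms : List (List String)) : Prop :=
  (∀ d ∈ dummy_atoms, d ≠ []) ∧
  (∀ b ∈ base_atoms, ∀ d ∈ dummy_atoms, b.drop 1 = d.drop 1 → b ≠ []) ∧
  ((∃ d ∈ dummy_atoms, ∃ s ∈ d.take 1, ckExtraIdP base_atoms dummy_atoms s) → ∀ l ∈ bond_atoms, 2 ≤ l.length) ∧
  (∀ l ∈ bond_atoms, ∀ a ∈ l.take 1, ∀ c ∈ (l.drop 1).take 1,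
     (ckExtraIdP base_atoms dummy_atoms a → (PySem.Int.ofStr? c).isSome = true) ∧
     (ckExtraIdP base_atoms dummy_atoms c → c ≠ a → (PySem.Int.ofStr? a).isSome = true))
instance (base_atoms : List (List String)) (dummy_atoms : List (List String)) (bond_atoms : List (List String)) : Decidable (Pre_create_key base_atoms dummy_atoms bond_atoms) := by unfold Pre_create_key ckExtraIdP ckMatchedIdP; infer_instance

def pvWitness_create_key : List (List String) × List (List String) × List (List String) :=
  ([["1", "a"]], [["2", "a"]], [])

-- On inputs where some matched dummy atom id is bonded (via bond_atoms) to an extra dummy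
-- atom, A returns the key list untrimmed (its final filter tests a string id against a list
-- of ints, never true), while B removes those peripheral pairs as the trim step intends.
def D_create_key (base_atoms : List (List String)) (dummy_atoms : List (List String)) (bond_atoms : List (List String)) : Prop :=
  ∃ d ∈ dummy_atoms, (∃ b ∈ base_atoms, b.drop 1 = d.drop 1) ∧
    ∃ s ∈ d.take 1, ckPeriphIdP base_atoms dummy_atoms bond_atoms s
instance (base_atoms : List (List String)) (dummy_atoms : List (List String)) (bond_atoms : List (List String)) : Decidable (D_create_key base_atoms dummy_atoms bond_atoms) := by
  unfold D_create_key
  haveI : DecidablePred (ckPeriphIdP base_atoms dummy_atoms bond_atoms) := fun s => by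
    unfold ckPeriphIdP ckExtraIdP ckMatchedIdP; infer_instance
  infer_instance

def Spec_create_key (base_atoms : List (List String)) (dummy_atoms : List (List String)) (bond_atoms : List (List String)) (out : List (List String)) : Prop := ¬ D_create_key base_atoms dummy_atoms bond_atoms → out = create_key_alt base_atoms dummy_atoms bond_atoms
instance (base_atoms : List (List String)) (dummy_atoms : List (List String)) (bond_atoms : List (List String)) (out : List (List String)) : Decidable (Spec_create_key base_atoms dummy_atoms bond_atoms out) := by unfold Spec_create_key; infer_instance

def pvDiffWitness_create_key : List (List String) × List (List String) × List (List String) :=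
  ([["1", "a"]], [["2", "a"], ["3", "b"]], [["3", "2"]])

def pvDiffWitnessOut_create_key : (List (List String)) × (List (List String)) :=
  ([["2", "1"]], [])

-- ===== CLAIM (what is proved, stated in full; the proofs are below) =====
def Claim_unchanged_create_key : Prop := ∀ (base_atoms : List (List String)) (dummy_atoms : List (List String)) (bond_atoms : List (List String)), Dom_create_key base_atoms dummy_atoms bond_atoms → Pre_create_key base_atoms dummy_atoms bond_atoms → Spec_create_key base_atoms dummy_atoms bond_atoms (create_key base_atoms dummy_atoms bond_atoms)
def Claim_changed_create_key : Prop := Dom_create_key (pvDiffWitness_create_key.1) (pvDiffWitness_create_key.2.1) (pvDiffWitness_create_key.2.2) ∧ Pre_create_key (pvDiffWitness_create_key.1) (pvDiffWitness_create_key.2.1) (pvDiffWitness_create_key.2.2) ∧ D_create_key (pvDiffWitness_create_key.1) (pvDiffWitness_create_key.2.1) (pvDiffWitness_create_key.2.2) ∧ create_key (pvDiffWitness_create_key.1) (pvDiffWitness_create_key.2.1) (pvDiffWitness_create_key.2.2) = pvDiffWitnessOut_create_key.1 ∧ create_key_alt (pvDiffWitness_create_key.1) (pvDiffWitness_create_key.2.1)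 (pvDiffWitness_create_key.2.2) = pvDiffWitnessOut_create_key.2 ∧ pvDiffWitnessOut_create_key.1 ≠ pvDiffWitnessOut_create_key.2
def Claim_exact_create_key : Prop := ∀ (base_atoms : List (List String)) (dummy_atoms : List (List String)) (bond_atoms : List (List String)), Dom_create_key base_atoms dummy_atoms bond_atoms → Pre_create_key base_atoms dummy_atoms bond_atoms → D_create_key base_atoms dummy_atoms bond_atoms → create_key base_atoms dummy_atoms bond_atoms ≠ create_key_alt base_atoms dummy_atoms bond_atoms

-- ===== LEMMAS AND PROOFS =====

-- the common closed form of both key lists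
def ckKeySpec (base_atoms dummy_atoms : List (List String)) : List (List String) :=
  base_atoms.flatMap (fun b =>
    (dummy_atoms.filter (fun d => b.drop 1 == d.drop 1)).map (fun d => [d.headD "", b.headD ""]))

lemma ckStrInIntList_false (s : String) (l : List Int) : ckStrInIntList s l = false := by
  simp [ckStrInIntList]

lemma create_key_eq_keyA (base_atoms dummy_atoms bond_atoms : List (List String)) :
    create_key base_atoms dummy_atoms bond_atoms = ckKeyA base_atoms dummy_atoms := by
  unfold create_key
  simp only [ckStrInIntList_false]
  simp only [Bool.false_eq_true, if_false]
  exact PySem.List.foldl_append_singleton_eq_self _ _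

lemma keyA_eq_spec (base_atoms dummy_atoms : List (List String)) :
    ckKeyA base_atoms dummy_atoms = ckKeySpec base_atoms dummy_atoms := by
  unfold ckKeyA ckKeySpec
  have step : ∀ x ∈ base_atoms, ∀ acc : List (List String),
      List.foldl (fun key line2 =>
        if (x.drop 1 == line2.drop 1) = true then key ++ [[line2.headD "", x.headD ""]] else key)
        acc dummy_atoms
      = acc ++ (List.filter (fun d => x.drop 1 == d.drop 1) dummy_atoms).map
          (fun d => [d.headD "", x.headD ""]) := fun x _ acc =>
    PySem.List.foldl_append_if (fun d => x.drop 1 == d.drop 1)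
      (fun d => [d.headD "", x.headD ""]) dummy_atoms acc
  refine (PySem.List.foldl_congr_mem' base_atoms
    (fun key line1 => List.foldl (fun key line2 =>
        if (line1.drop 1 == line2.drop 1) = true then key ++ [[line2.headD "", line1.headD ""]] else key)
        key dummy_atoms)
    (fun key line1 => key ++ (List.filter (fun d => line1.drop 1 == d.drop 1) dummy_atoms).map
        (fun d => [d.headD "", line1.headD ""]))
    [] step).trans ?_
  rw [PySem.List.foldl_append_eq_flatMap, List.nil_append]

lemma buckets_getD (dummy_atoms : List (List String)) (t : List String) :
    (ckBuckets dummy_atoms).getD t [] =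
      (dummy_atoms.filter (fun d => d.drop 1 == t)).map (fun d => d.headD "") := by
  unfold ckBuckets
  rw [show dummy_atoms.foldl (fun d ln => d.modify (ln.drop 1) [] (fun v => v ++ [ln.headD ""])) PySem.Dict.empty
        = List.foldl (fun d (p : List String × String) => d.modify p.1 [] (fun v => v ++ [p.2]))
            PySem.Dict.empty (dummy_atoms.map (fun ln => (ln.drop 1, ln.headD "")))
      from Eq.symm List.foldl_map]
  rw [PySem.Dict.getD_foldl_modify_append]
  simp [List.filter_map, Function.comp_def]

lemma keyB_eq_spec (base_atoms dummy_atoms : List (List String)) :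
    ckKeyB base_atoms dummy_atoms = ckKeySpec base_atoms dummy_atoms := by
  unfold ckKeyB ckKeySpec
  refine congrArg (fun f => List.flatMap f base_atoms) (funext fun b => ?_)
  rw [buckets_getD, List.map_map]
  refine congrArg _ (List.filter_congr fun d _ => ?_)
  rw [Bool.eq_iff_iff]
  constructor <;> (intro h; exact beq_iff_eq.mpr (beq_iff_eq.mp h).symm)

lemma mem_keySpec (base_atoms dummy_atoms : List (List String)) (p : List String) :
    p ∈ ckKeySpec base_atoms dummy_atoms ↔
      ∃ b ∈ base_atoms, ∃ d ∈ dummy_atoms, b.drop 1 = d.drop 1 ∧ p = [d.headD "", b.headD ""] := by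
  simp [ckKeySpec, List.mem_filter]
  constructor
  · rintro ⟨b, hb, d, ⟨hd, he⟩, rfl⟩; exact ⟨b, hb, d, hd, he, rfl⟩
  · rintro ⟨b, hb, d, hd, he, rfl⟩; exact ⟨b, hb, d, ⟨hd, he⟩, rfl⟩

lemma head?_iff_headD {d : List String} (h : d ≠ []) (s : String) :
    d.head? = some s ↔ d.headD "" = s := by
  cases d with
  | nil => exact absurd rfl h
  | cons a t => simp

lemma mem_take_one {l : List String} {a : String} : a ∈ l.take 1 ↔ l[0]? = some a := by
  cases l <;> simp [eq_comm]

lemma headD_mem_take_one {d : List String} (h : d ≠ []) : d.headD "" ∈ d.take 1 := by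
  cases d with
  | nil => exact absurd rfl h
  | cons a t => simp

lemma getElem?_of_len2 {l : List String} (h : 2 ≤ l.length) :
    l[0]? = some (l.getD 0 "") ∧ l[1]? = some (l.getD 1 "") := by
  match l, h with
  | a :: b :: t, _ => simp [List.getD]

lemma getD_of_getElem? {l : List String} {n : ℕ} {a : String} (h : l[n]? = some a) :
    l.getD n "" = a := by
  rw [List.getD_eq_getElem?_getD, h]; rfl

lemma mem_extraSet (base_atoms dummy_atoms : List (List String))
    (h1 : ∀ d ∈ dummy_atoms, d ≠ []) (s : String) :
    s ∈ ckExtraSet base_atoms dummy_atoms ↔ ckExtraIdP base_atoms dummy_atoms s := by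
  unfold ckExtraSet ckMatchedSet ckBaseTails ckExtraIdP ckMatchedIdP
  rw [PySem.Set.mem_diff]
  simp only [PySem.Set.mem_ofList, List.mem_map, List.mem_filter, PySem.Set.contains_iff]
  constructor
  · rintro ⟨⟨a, ha, rfl⟩, hnm⟩
    refine ⟨⟨a, ha, (head?_iff_headD (h1 a ha) _).mpr rfl⟩, ?_⟩
    rintro ⟨x, hx, hxs, b, hb, hbd⟩
    exact hnm ⟨x, ⟨hx, b, hb, hbd⟩, (head?_iff_headD (h1 x hx) _).mp hxs⟩
  · rintro ⟨⟨a, ha, has⟩, hnm⟩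
    refine ⟨⟨a, ha, (head?_iff_headD (h1 a ha) _).mp has⟩, ?_⟩
    rintro ⟨x, ⟨hx, b, hb, hbd⟩, hxs⟩
    exact hnm ⟨x, hx, (head?_iff_headD (h1 x hx) _).mpr hxs, b, hb, hbd⟩

lemma mem_periph_fold (X : PySem.Set String) (L : List (List String)) (P : PySem.Set String) (s : String) :
    s ∈ L.foldl (ckPeriphStep X) P ↔ s ∈ P ∨ ∃ l ∈ L,
      (PySem.Set.contains X (l.getD 0 "") = true ∧ l.getD 1 "" = s) ∨
      (PySem.Set.contains X (l.getD 1 "") = true ∧ l.getD 1 "" ≠ l.getD 0 "" ∧ l.getD 0 "" = s) := by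
  induction L generalizing P with
  | nil => simp
  | cons l L ih =>
    rw [List.foldl_cons, ih]
    have hstep : s ∈ ckPeriphStep X P l ↔ s ∈ P ∨
        (PySem.Set.contains X (l.getD 0 "") = true ∧ l.getD 1 "" = s) ∨
        (PySem.Set.contains X (l.getD 1 "") = true ∧ l.getD 1 "" ≠ l.getD 0 "" ∧ l.getD 0 "" = s) := by
      unfold ckPeriphStep
      split_ifs with h2 h1 h1 <;>
        simp_all [PySem.Set.mem_add, Bool.and_eq_true,
          beq_eq_false_iff_ne] <;> tauto
    rw [hstep]
    simp only [List.mem_cons]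
    constructor
    · rintro ((hP | hl) | hL)
      · exact Or.inl hP
      · exact Or.inr ⟨l, Or.inl rfl, hl⟩
      · rcases hL with ⟨l', hl', hc⟩; exact Or.inr ⟨l', Or.inr hl', hc⟩
    · rintro (hP | ⟨l', (rfl | hl'), hc⟩)
      · exact Or.inl (Or.inl hP)
      · exact Or.inl (Or.inr hc)
      · exact Or.inr ⟨l', hl', hc⟩

lemma mem_periphSet (base_atoms dummy_atoms bond_atoms : List (List String))
    (hpre : Pre_create_key base_atoms dummy_atoms bond_atoms) (s : String) :
    s ∈ ckPeriphSet base_atoms dummy_atoms bond_atoms ↔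
      ckPeriphIdP base_atoms dummy_atoms bond_atoms s := by
  obtain ⟨h1, _h2, h3, _h4⟩ := hpre
  unfold ckPeriphSet
  by_cases hE : (ckExtraSet base_atoms dummy_atoms).isEmpty
  · rw [if_pos hE]
    simp only [PySem.Set.empty, List.not_mem_nil, false_iff]
    rintro ⟨l, _hl, a, _ha, c, _hc, hcase⟩
    have hx : ∃ t, ckExtraIdP base_atoms dummy_atoms t := by
      rcases hcase with ⟨h, _⟩ | ⟨h, _⟩
      · exact ⟨a, h⟩
      · exact ⟨c, h⟩
    rcases hx with ⟨t, ht⟩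
    have hmem : t ∈ ckExtraSet base_atoms dummy_atoms := (mem_extraSet _ _ h1 t).mpr ht
    rw [List.isEmpty_iff.mp hE] at hmem
    exact List.not_mem_nil hmem
  · rw [if_neg hE]
    have hhx : ∃ d ∈ dummy_atoms, ∃ t ∈ d.take 1, ckExtraIdP base_atoms dummy_atoms t := by
      rcases List.isEmpty_eq_false_iff_exists_mem.mp (Bool.eq_false_iff.mpr hE) with ⟨t, ht⟩
      have ht' := (mem_extraSet _ _ h1 t).mp ht
      rcases ht'.1 with ⟨d, hd, hds⟩
      exact ⟨d, hd, t, mem_take_one.mpr (List.head?_eq_getElem? ▸ hds), ht'⟩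
    have hlen := h3 hhx
    rw [mem_periph_fold]
    simp only [PySem.Set.empty, List.not_mem_nil, false_or]
    unfold ckPeriphIdP
    constructor
    · rintro ⟨l, hl, hc⟩
      obtain ⟨hg0, hg1⟩ := getElem?_of_len2 (hlen l hl)
      refine ⟨l, hl, l.getD 0 "", mem_take_one.mpr hg0, l.getD 1 "",
        mem_take_one.mpr (by simpa [List.getElem?_drop] using hg1), ?_⟩
      rcases hc with ⟨hx0, h1s⟩ | ⟨hx1, hne, h0s⟩
      · exact Or.inl ⟨(mem_extraSet _ _ h1 _).mp ((PySem.Set.contains_iff _ _).mp hx0), h1s⟩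
      · exact Or.inr ⟨(mem_extraSet _ _ h1 _).mp ((PySem.Set.contains_iff _ _).mp hx1), hne, h0s⟩
    · rintro ⟨l, hl, a, ha, c, hc, hcase⟩
      have ha0 : l.getD 0 "" = a := getD_of_getElem? (mem_take_one.mp ha)
      have hc1 : l.getD 1 "" = c :=
        getD_of_getElem? (n := 1) (by simpa [List.getElem?_drop] using mem_take_one.mp hc)
      refine ⟨l, hl, ?_⟩
      rcases hcase with ⟨hx, hs⟩ | ⟨hx, hne, hs⟩
      · exact Or.inl ⟨(PySem.Set.contains_iff _ _).mpr ((mem_extraSet _ _ h1 _).mpr (ha0 ▸ hx)),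
          hc1 ▸ hs⟩
      · exact Or.inr ⟨(PySem.Set.contains_iff _ _).mpr ((mem_extraSet _ _ h1 _).mpr (hc1 ▸ hx)),
          by rw [ha0, hc1]; exact hne, ha0 ▸ hs⟩

-- ===== VERDICT (by name: the statement is the Claim_ definition above) =====
theorem create_key_spec : Claim_unchanged_create_key := by
  intro base_atoms dummy_atoms bond_atoms _hdom hpre hnd
  rw [create_key_eq_keyA, keyA_eq_spec]
  unfold create_key_alt
  rw [keyB_eq_spec]
  refine (List.filter_eq_self.mpr ?_).symm
  intro p hp
  rw [Bool.not_eq_true', Bool.eq_false_iff]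
  intro hcon
  have hmem := (PySem.Set.contains_iff _ _).mp hcon
  have hper := (mem_periphSet _ _ _ hpre _).mp hmem
  rcases (mem_keySpec _ _ p).mp hp with ⟨b, hb, d, hd, he, rfl⟩
  exact hnd ⟨d, hd, ⟨b, hb, he⟩, d.headD "", headD_mem_take_one (hpre.1 d hd), hper⟩

theorem create_key_changed : Claim_changed_create_key := by
  unfold Claim_changed_create_key; decide

theorem create_key_tight : Claim_exact_create_key := by
  intro base_atoms dummy_atoms bond_atoms _hdom hpre hd heq
  rcases hd with ⟨d, hdm, ⟨b, hb, hbd⟩, s, hs, hper⟩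
  have hsd : d.headD "" = s :=
    (head?_iff_headD (hpre.1 d hdm) s).mp (List.head?_eq_getElem? ▸ mem_take_one.mp hs)
  rw [create_key_eq_keyA, keyA_eq_spec] at heq
  unfold create_key_alt at heq
  rw [keyB_eq_spec] at heq
  have hp : [d.headD "", b.headD ""] ∈ ckKeySpec base_atoms dummy_atoms :=
    (mem_keySpec _ _ _).mpr ⟨b, hb, d, hdm, hbd, rfl⟩
  have hall := List.filter_eq_self.mp heq.symm _ hp
  rw [Bool.not_eq_true', Bool.eq_false_iff] at hall
  rw [← hsd] at hper
  exact hall ((PySem.Set.contains_iff _ _).mpr ((mem_periphSet _ _ _ hpre _).mpr hper))
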